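-- pv_equiv track=rewrite | github.com/arinze19/DSA | src/practice/BlackRock/HappyNumbers/main.py | happy_number_helper
-- ===== SOURCE A (Python) =====
-- def happy_number_helper(num, cache):
--     if (num == 1):
--         return True
--
--     if (num in cache):
--         return False
--
--     cache[num] = num
--
--     num_str = str(num)
--
--     digits = list(num_str)
--
--     squared = sum(int(digit) ** 2 for digit in digits)
--
--     return happy_number_helper(squared, cache)
-- ===== SOURCE B (Python) =====
-- def happy_number_helper(num, cache):
--     # Iterative rewrite with a separate visited SET (seeded with cache's keys)
--     # instead of recursing while mutating the dict; digits are extracted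
--     # arithmetically with divmod instead of the str()/int() round-trip.
--     # NOTE: unlike A, B does not mutate the passed cache dict (return-value
--     # equivalence only).
--     seen = set(cache)
--     while num != 1:
--         if num in seen:
--             return False
--         seen.add(num)
--         n, s = num, 0
--         while n > 0:
--             n, d = divmod(n, 10)
--             s += d * d
--         num = s
--     return True
-- ===== Notes on version B (the rewrite author's own statement) =====
-- stated objective: alternative
-- what changed: Replaces the cache-mutating tail recursion by an explicit while loop over a separate visited set seeded with the cache's keys, and extracts digits arithmetically with divmod instead of the str()/int() round-trip.
import Mathlib
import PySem

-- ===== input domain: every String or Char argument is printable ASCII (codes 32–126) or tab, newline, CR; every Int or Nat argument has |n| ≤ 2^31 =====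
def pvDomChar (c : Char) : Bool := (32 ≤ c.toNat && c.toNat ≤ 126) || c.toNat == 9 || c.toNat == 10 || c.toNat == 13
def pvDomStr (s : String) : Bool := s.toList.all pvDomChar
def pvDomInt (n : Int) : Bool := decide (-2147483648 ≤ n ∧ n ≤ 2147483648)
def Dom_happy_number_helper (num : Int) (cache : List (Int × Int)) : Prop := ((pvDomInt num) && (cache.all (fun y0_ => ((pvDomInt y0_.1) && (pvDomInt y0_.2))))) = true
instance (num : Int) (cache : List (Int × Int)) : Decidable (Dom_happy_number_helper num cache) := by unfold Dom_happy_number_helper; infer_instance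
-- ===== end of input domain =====

-- B replaces A's cache-mutating tail recursion by an explicit while loop over a separate visited
-- SET seeded with the cache's keys, extracting digits arithmetically with divmod instead of A's
-- str()/int() round-trip; the equivalence proved is about the RETURN value only (A mutates the
-- passed cache dict, B does not). Both ports run their loop on a fuel argument that is proved
-- below to strictly exceed the number of iterations (pvMeasureS_dec), so the fuel-exhausted
-- branch is never reached.


-- fuel bound shared by both ports (a pure totality device, not part of either algorithm):
-- while the current number stays ≤ 162 every iteration marks one more element of 0..162 as
-- seen (pvFreeCount), and a number ≥ 163 strictly shrinks; proofs are below the claim block.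
def pvFreeCount (seen : List Int) : Nat :=
  ((List.range 163).filter (fun k : Nat => decide (¬ ((k : Int) ∈ seen)))).length

def pvMeasureS (num : Int) (seen : List Int) : Nat :=
  (max num 162).toNat * 164 + pvFreeCount seen + (if num < 0 then 27000 else 0)

-- ===== PORT A =====
-- A's 'sum(int(digit) ** 2 for digit in digits)': left-to-right fold; a non-digit char makes
-- int() raise ValueError, modelled by the Option becoming none (PySem.Int.ofChars? [c] = int(c)).
def pvSumSqStep (acc : Option Int) (c : Char) : Option Int :=
  match acc, PySem.Int.ofChars? [c] with
  | some a, some d => some (a + d ^ 2)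
  | _, _ => none

def pvSumSq? (cs : List Char) : Option Int := cs.foldl pvSumSqStep (some 0)

-- A's tail recursion, on fuel (the fuel-0 branch is proved unreachable below)
def pvGoA : Nat → Int → List (Int × Int) → Bool
  | 0, _, _ => false
  | fuel + 1, num, cache =>
    if num = 1 then true
    else if (PySem.Dict.mk cache).contains num then false
    else
      -- cache[num] = num ; num_str = str(num) ; digits = list(num_str) ; squared = sum(...)
      match pvSumSq? (PySem.Int.toChars num) with
      | none => false   -- here Python's int() raises ValueError (num < 0); outside Pre_
      | some squared => pvGoA fuel squared (((PySem.Dict.mk cache).insert num num).items)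

def happy_number_helper (num : Int) (cache : List (Int × Int)) : Bool :=
  pvGoA (pvMeasureS num (cache.map Prod.fst) + 1) num cache

-- ===== PORT B =====
-- the inner loop 'n, s = num, 0 ; while n > 0: n, d = divmod(n, 10); s += d * d', on fuel
-- (n loses at least one decimal digit per step, so n.toNat + 1 steps always suffice)
def pvDigitSquaresF : Nat → Int → Int → Int
  | 0, _, s => s
  | fuel + 1, n, s =>
    if 0 < n then
      pvDigitSquaresF fuel (PySem.Int.floordiv n 10) (s + PySem.Int.mod n 10 * PySem.Int.mod n 10)
    else s

def pvDigitSquares (n s : Int) : Int := pvDigitSquaresF (n.toNat + 1) n s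

-- the outer loop 'while num != 1: …' over the visited set 'seen', on the same fuel bound
def pvGoB : Nat → Int → PySem.Set Int → Bool
  | 0, _, _ => false
  | fuel + 1, num, seen =>
    if num ≠ 1 then
      if PySem.Set.contains seen num then false
      else pvGoB fuel (pvDigitSquares num 0) (PySem.Set.add seen num)
    else true

-- 'seen = set(cache)': the set of the dict's keys
def happy_number_helper_alt (num : Int) (cache : List (Int × Int)) : Bool :=
  pvGoB (pvMeasureS num (PySem.Set.ofList ((PySem.Dict.mk cache).keys)) + 1) num
    (PySem.Set.ofList ((PySem.Dict.mk cache).keys))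

-- ===== PRECONDITION & SPEC =====
-- Pre_ excludes exactly the inputs on which A raises ValueError: negative num that is not a key of
-- cache (int('-') fails on the sign character of str(num)); B returns False there instead.
def Pre_happy_number_helper (num : Int) (cache : List (Int × Int)) : Prop :=
  0 ≤ num ∨ (PySem.Dict.mk cache).contains num = true
instance (num : Int) (cache : List (Int × Int)) : Decidable (Pre_happy_number_helper num cache) := by unfold Pre_happy_number_helper; infer_instance
def pvWitness_happy_number_helper : Int × (List (Int × Int)) := (19, [])

def Spec_happy_number_helper (num : Int) (cache : List (Int × Int)) (out : Bool) : Prop := out = happy_number_helper_alt num cache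
instance (num : Int) (cache : List (Int × Int)) (out : Bool) : Decidable (Spec_happy_number_helper num cache out) := by unfold Spec_happy_number_helper; infer_instance

-- ===== CLAIM (what is proved, stated in full; the proofs are below) =====
def Claim_equal_happy_number_helper : Prop := ∀ (num : Int) (cache : List (Int × Int)), Dom_happy_number_helper num cache → Pre_happy_number_helper num cache → Spec_happy_number_helper num cache (happy_number_helper num cache)

-- ===== LEMMAS AND PROOFS =====

-- ----- pvDigitSquares: fuel irrelevance and one-step unfolding -----

theorem pvDSF_succ (fuel : Nat) (n s : Int) :
    pvDigitSquaresF (fuel + 1) n s =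
      if 0 < n then
        pvDigitSquaresF fuel (PySem.Int.floordiv n 10)
          (s + PySem.Int.mod n 10 * PySem.Int.mod n 10)
      else s := rfl

theorem pvDS_floordiv_toNat_lt (n : Int) (h : 0 < n) :
    (PySem.Int.floordiv n 10).toNat < n.toNat := by
  rw [PySem.Int.floordiv_eq_ediv_of_pos (by norm_num)]
  omega

theorem pvDSF_irrel : ∀ (fuel : Nat) (n s : Int), n.toNat < fuel →
    pvDigitSquaresF fuel n s = pvDigitSquares n s := by
  intro fuel
  induction fuel using Nat.strong_induction_on with
  | _ fuel ih =>
    intro n s hf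
    match fuel, hf with
    | fuel + 1, hf =>
      unfold pvDigitSquares
      rw [pvDSF_succ, pvDSF_succ]
      by_cases h : 0 < n
      · rw [if_pos h, if_pos h]
        have hq := pvDS_floordiv_toNat_lt n h
        rw [ih fuel (by omega) _ _ (by omega), ih n.toNat (by omega) _ _ (by omega)]
      · rw [if_neg h, if_neg h]

theorem pvDS_unfold (n s : Int) :
    pvDigitSquares n s =
      if 0 < n then
        pvDigitSquares (PySem.Int.floordiv n 10) (s + PySem.Int.mod n 10 * PySem.Int.mod n 10)
      else s := by
  show pvDigitSquaresF (n.toNat + 1) n s = _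
  rw [pvDSF_succ]
  by_cases h : 0 < n
  · rw [if_pos h, if_pos h, pvDSF_irrel n.toNat _ _ (pvDS_floordiv_toNat_lt n h)]
  · rw [if_neg h, if_neg h]

-- ----- arithmetic facts about pvDigitSquares -----

theorem pvDS_acc_aux : ∀ (m : Nat) (n s : Int), n.toNat = m →
    pvDigitSquares n s = s + pvDigitSquares n 0 := by
  intro m
  induction m using Nat.strong_induction_on with
  | _ m ih =>
    intro n s hm
    by_cases h : 0 < n
    · have hq := pvDS_floordiv_toNat_lt n h
      rw [pvDS_unfold n s, pvDS_unfold n 0, if_pos h, if_pos h,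
        ih _ (hm ▸ hq) _ (s + PySem.Int.mod n 10 * PySem.Int.mod n 10) rfl,
        ih _ (hm ▸ hq) _ (0 + PySem.Int.mod n 10 * PySem.Int.mod n 10) rfl]
      ring
    · rw [pvDS_unfold n s, pvDS_unfold n 0, if_neg h, if_neg h]
      ring

theorem pvDS_acc (n s : Int) : pvDigitSquares n s = s + pvDigitSquares n 0 :=
  pvDS_acc_aux n.toNat n s rfl

theorem pvDS_step (n : Int) (h : 0 < n) :
    pvDigitSquares n 0 =
      PySem.Int.mod n 10 * PySem.Int.mod n 10 + pvDigitSquares (PySem.Int.floordiv n 10) 0 := by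
  rw [pvDS_unfold, if_pos h, pvDS_acc]
  ring

theorem pvDS_nonneg_aux : ∀ (m : Nat) (n s : Int), n.toNat = m → 0 ≤ s →
    0 ≤ pvDigitSquares n s := by
  intro m
  induction m using Nat.strong_induction_on with
  | _ m ih =>
    intro n s hm hs
    by_cases h : 0 < n
    · rw [pvDS_unfold, if_pos h]
      exact ih _ (hm ▸ pvDS_floordiv_toNat_lt n h) _ _ rfl
        (add_nonneg hs (mul_self_nonneg _))
    · rw [pvDS_unfold, if_neg h]
      exact hs

theorem pvDS_nonneg (n : Int) : 0 ≤ pvDigitSquares n 0 :=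
  pvDS_nonneg_aux n.toNat n 0 rfl le_rfl

theorem pvDS_neg (n : Int) (h : n < 0) : pvDigitSquares n 0 = 0 := by
  rw [pvDS_unfold, if_neg (by omega)]

-- ----- A's digit-square sum over str(n) equals B's arithmetic digit-square sum -----

theorem pvSumSqStep_some (a : Int) (c : Char) (d : Int) (h : PySem.Int.ofChars? [c] = some d) :
    pvSumSqStep (some a) c = some (a + d ^ 2) := by
  unfold pvSumSqStep
  rw [h]

-- int(c) of a single decimal digit character
theorem pv_digitVal : ∀ m : Nat, m < 10 → PySem.Int.ofChars? [Nat.digitChar m] = some (m : Int) := by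
  decide

theorem pvSumSq_toDigits : ∀ m : Nat,
    pvSumSq? (Nat.toDigits 10 m) = some (pvDigitSquares (m : Int) 0) := by
  intro m
  induction m using Nat.strong_induction_on with
  | _ m ih =>
    by_cases hm : m < 10
    · rw [Nat.toDigits_of_lt_base hm]
      show pvSumSqStep (some 0) (Nat.digitChar m) = _
      rw [pvSumSqStep_some 0 _ _ (pv_digitVal m hm)]
      rcases Nat.eq_zero_or_pos m with h0 | h0
      · subst h0
        rw [pvDS_unfold]
        norm_num
      · have hmod : PySem.Int.mod (m : Int) 10 = (m : Int) := by
          rw [PySem.Int.mod_eq_emod_of_pos (by norm_num)]; omega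
        have hdiv : PySem.Int.floordiv (m : Int) 10 = 0 := by
          rw [PySem.Int.floordiv_eq_ediv_of_pos (by norm_num)]; omega
        rw [pvDS_step (m : Int) (by exact_mod_cast h0), hmod, hdiv, pvDS_unfold]
        norm_num
        ring
    · have hm : 10 ≤ m := by omega
      rw [Nat.toDigits_of_base_le (by norm_num) hm]
      unfold pvSumSq?
      rw [List.foldl_append]
      show pvSumSqStep (pvSumSq? (Nat.toDigits 10 (m / 10))) (Nat.digitChar (m % 10)) = _
      rw [ih (m / 10) (by omega),
        pvSumSqStep_some _ _ _ (pv_digitVal (m % 10) (Nat.mod_lt _ (by norm_num)))]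
      have hdiv : PySem.Int.floordiv (m : Int) 10 = ((m / 10 : Nat) : Int) := by
        rw [PySem.Int.floordiv_eq_ediv_of_pos (by norm_num)]; omega
      have hmod : PySem.Int.mod (m : Int) 10 = ((m % 10 : Nat) : Int) := by
        rw [PySem.Int.mod_eq_emod_of_pos (by norm_num)]; omega
      rw [pvDS_step (m : Int) (by exact_mod_cast Nat.lt_of_lt_of_le (by norm_num) hm), hdiv, hmod]
      congr 1
      ring

theorem pvSumSq_toChars (n : Int) (h : 0 ≤ n) :
    pvSumSq? (PySem.Int.toChars n) = some (pvDigitSquares n 0) := by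
  have := pvSumSq_toDigits n.toNat
  rw [Int.toNat_of_nonneg h] at this
  rw [PySem.Int.toChars, if_neg (by omega)]
  exact this

-- ----- bounds on one digit-square step -----

theorem pvDS_digit1 (n : Int) (h0 : 0 ≤ n) (h9 : n ≤ 9) : pvDigitSquares n 0 = n * n := by
  rcases lt_or_eq_of_le h0 with hpos | hzero
  · rw [pvDS_step n hpos]
    have hm : PySem.Int.mod n 10 = n := by
      rw [PySem.Int.mod_eq_emod_of_pos (by norm_num)]; omega
    have hd : PySem.Int.floordiv n 10 = 0 := by
      rw [PySem.Int.floordiv_eq_ediv_of_pos (by norm_num)]; omega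
    rw [hm, hd, pvDS_unfold]
    norm_num
  · rw [← hzero, pvDS_unfold]
    norm_num

theorem pvDS_split (n : Int) (hpos : 0 < n) :
    pvDigitSquares n 0 = (n % 10) * (n % 10) + pvDigitSquares (n / 10) 0 := by
  rw [pvDS_step n hpos, PySem.Int.mod_eq_emod_of_pos (by norm_num),
    PySem.Int.floordiv_eq_ediv_of_pos (by norm_num)]

theorem pvDS_digit3 (n : Int) (h0 : 0 ≤ n) (h : n ≤ 999) :
    pvDigitSquares n 0 =
      (n % 10) * (n % 10) + (n / 10 % 10) * (n / 10 % 10) + (n / 100) * (n / 100) := by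
  by_cases h9 : n ≤ 9
  · rw [pvDS_digit1 n h0 h9]
    have e0 : n % 10 = n := by omega
    have e1 : n / 10 = 0 := by omega
    have e2 : n / 100 = 0 := by omega
    rw [e0, e1, e2]
    norm_num
  · by_cases h99 : n ≤ 99
    · rw [pvDS_split n (by omega), pvDS_digit1 (n / 10) (by omega) (by omega)]
      have e1 : n / 10 % 10 = n / 10 := by omega
      have e2 : n / 100 = 0 := by omega
      rw [e1, e2]
      ring
    · rw [pvDS_split n (by omega), pvDS_split (n / 10) (by omega),
        pvDS_digit1 (n / 10 / 10) (by omega) (by omega)]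
      have e1 : n / 10 / 10 = n / 100 := by omega
      rw [e1]
      ring

theorem pvDS_le_162 (n : Int) (h0 : 0 ≤ n) (h : n ≤ 162) : pvDigitSquares n 0 ≤ 162 := by
  rw [pvDS_digit3 n h0 (by omega)]
  have s1 : n % 10 * (n % 10) ≤ 81 := by
    have := mul_self_le_mul_self (show (0 : Int) ≤ n % 10 by omega) (show n % 10 ≤ 9 by omega)
    linarith
  by_cases hd : n / 100 = 0
  · have s2 : n / 10 % 10 * (n / 10 % 10) ≤ 81 := by
      have := mul_self_le_mul_self (show (0 : Int) ≤ n / 10 % 10 by omega)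
        (show n / 10 % 10 ≤ 9 by omega)
      linarith
    rw [hd]
    linarith
  · have hd1 : n / 100 = 1 := by omega
    have s2 : n / 10 % 10 * (n / 10 % 10) ≤ 36 := by
      have := mul_self_le_mul_self (show (0 : Int) ≤ n / 10 % 10 by omega)
        (show n / 10 % 10 ≤ 6 by omega)
      linarith
    rw [hd1]
    linarith

theorem pvDS_le_163 (n : Int) (h0 : 0 ≤ n) (h : n ≤ 243) : pvDigitSquares n 0 ≤ 163 := by
  rw [pvDS_digit3 n h0 (by omega)]
  have s1 : n % 10 * (n % 10) ≤ 81 := by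
    have := mul_self_le_mul_self (show (0 : Int) ≤ n % 10 by omega) (show n % 10 ≤ 9 by omega)
    linarith
  by_cases hd2 : n / 100 ≤ 1
  · have s2 : n / 10 % 10 * (n / 10 % 10) ≤ 81 := by
      have := mul_self_le_mul_self (show (0 : Int) ≤ n / 10 % 10 by omega)
        (show n / 10 % 10 ≤ 9 by omega)
      linarith
    have s3 : n / 100 * (n / 100) ≤ 1 := by
      have := mul_self_le_mul_self (show (0 : Int) ≤ n / 100 by omega) (show n / 100 ≤ 1 by omega)
      linarith
    linarith
  · have hd2' : n / 100 = 2 := by omega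
    have s2 : n / 10 % 10 * (n / 10 % 10) ≤ 16 := by
      have := mul_self_le_mul_self (show (0 : Int) ≤ n / 10 % 10 by omega)
        (show n / 10 % 10 ≤ 4 by omega)
      linarith
    rw [hd2']
    linarith

theorem pvDS_lt_self_aux : ∀ (m : Nat) (n : Int), n.toNat = m → 163 ≤ n →
    pvDigitSquares n 0 < n := by
  intro m
  induction m using Nat.strong_induction_on with
  | _ m ih =>
    intro n hm h
    by_cases h999 : n ≤ 999
    · rw [pvDS_digit3 n (by omega) h999]
      have t0 : n % 10 * (n % 10) ≤ 9 * (n % 10) := by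
        nlinarith [mul_nonneg (show (0 : Int) ≤ 9 - n % 10 by omega)
          (show (0 : Int) ≤ n % 10 by omega)]
      have t1 : n / 10 % 10 * (n / 10 % 10) ≤ 9 * (n / 10 % 10) := by
        nlinarith [mul_nonneg (show (0 : Int) ≤ 9 - n / 10 % 10 by omega)
          (show (0 : Int) ≤ n / 10 % 10 by omega)]
      have t2 : n / 100 * (n / 100) ≤ 9 * (n / 100) := by
        nlinarith [mul_nonneg (show (0 : Int) ≤ 9 - n / 100 by omega)
          (show (0 : Int) ≤ n / 100 by omega)]
      have hn : n = 100 * (n / 100) + 10 * (n / 10 % 10) + n % 10 := by omega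
      have hd2 : 1 ≤ n / 100 := by omega
      have hb0 : n % 10 ≤ 9 := by omega
      linarith
    · rw [pvDS_split n (by omega)]
      have hr : n % 10 * (n % 10) ≤ 81 := by
        have := mul_self_le_mul_self (show (0 : Int) ≤ n % 10 by omega) (show n % 10 ≤ 9 by omega)
        linarith
      have h1000 : 1000 ≤ n := by omega
      by_cases hq : n / 10 ≤ 243
      · have hb := pvDS_le_163 (n / 10) (by omega) hq
        linarith
      · have hb := ih (n / 10).toNat (by omega) (n / 10) rfl (by omega)
        have h10 : n / 10 + 82 ≤ n := by omega
        linarith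

theorem pvDS_lt_self (n : Int) (h : 163 ≤ n) : pvDigitSquares n 0 < n :=
  pvDS_lt_self_aux n.toNat n rfl h

-- ----- the fuel bound strictly decreases at every loop iteration -----

theorem pvFreeCount_le (seen : List Int) : pvFreeCount seen ≤ 163 := by
  have h := List.length_filter_le
    (fun k : Nat => decide (¬ ((k : Int) ∈ seen))) (List.range 163)
  simpa [pvFreeCount] using h

theorem pvFreeCount_lt (num : Int) (seen : List Int) (h0 : 0 ≤ num) (h1 : num ≤ 162)
    (hc : num ∉ seen) :
    pvFreeCount (seen ++ [num]) < pvFreeCount seen := by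
  rw [pvFreeCount, pvFreeCount]
  obtain ⟨l1, l2, hsplit⟩ : ∃ l1 l2, List.range 163 = l1 ++ num.toNat :: l2 :=
    List.append_of_mem (List.mem_range.mpr (by omega))
  have hnumcast : ((num.toNat : Nat) : Int) = num := by omega
  have hpq : ∀ a : Nat,
      (fun k : Nat => decide (¬ ((k : Int) ∈ seen ++ [num]))) a = true →
      (fun k : Nat => decide (¬ ((k : Int) ∈ seen))) a = true := by
    intro a ha
    simp only [decide_eq_true_eq, List.mem_append, List.mem_singleton] at ha ⊢
    exact fun h => ha (Or.inl h)
  have hle1 := (List.monotone_filter_right l1 hpq).length_le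
  have hle2 := (List.monotone_filter_right l2 hpq).length_le
  have hat_new : (decide (¬ (((num.toNat : Nat) : Int) ∈ seen ++ [num]))) = false := by
    simp [hnumcast]
  have hat_old : (decide (¬ (((num.toNat : Nat) : Int) ∈ seen))) = true := by
    simp [hnumcast, hc]
  rw [hsplit, List.filter_append, List.filter_append, List.filter_cons, List.filter_cons,
    hat_new, hat_old]
  simp only [if_true, Bool.false_eq_true, if_false]
  simp only [List.length_append, List.length_cons]
  omega

theorem pvMeasureS_dec (num : Int) (seen : List Int) (hc : num ∉ seen) :
    pvMeasureS (pvDigitSquares num 0) (seen ++ [num]) < pvMeasureS num seen := by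
  have hfc' := pvFreeCount_le (seen ++ [num])
  unfold pvMeasureS
  by_cases hneg : num < 0
  · rw [pvDS_neg num hneg, if_neg (by omega), if_pos hneg,
      max_eq_right (by omega : (0 : Int) ≤ 162), max_eq_right (by omega : num ≤ 162)]
    omega
  · by_cases h162 : num ≤ 162
    · have hs0 := pvDS_nonneg num
      have hsle := pvDS_le_162 num (by omega) h162
      have hflt := pvFreeCount_lt num seen (by omega) h162 hc
      rw [if_neg (by omega), if_neg (by omega),
        max_eq_right hsle, max_eq_right h162]
      omega
    · have hs0 := pvDS_nonneg num
      have hslt := pvDS_lt_self num (by omega)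
      have hmax : (max (pvDigitSquares num 0) 162).toNat ≤ (max num 162).toNat - 1 := by
        rcases max_cases (pvDigitSquares num 0) (162 : Int) with ⟨he, _⟩ | ⟨he, _⟩ <;>
          rw [he, max_eq_left (by omega : (162 : Int) ≤ num)] <;> omega
      have hmaxn : 163 ≤ (max num 162).toNat := by
        rw [max_eq_left (by omega : (162 : Int) ≤ num)]; omega
      rw [if_neg (by omega), if_neg (by omega)]
      omega

-- ----- the seen-set mirrors the cache's keys -----

theorem pv_bool_eq {a b : Bool} (h : a = true ↔ b = true) : a = b := by
  cases a <;> cases b <;> simp_all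

theorem pv_dict_mem (cache : List (Int × Int)) (x : Int) :
    (PySem.Dict.mk cache).contains x = true ↔ x ∈ cache.map Prod.fst :=
  PySem.Dict.contains_iff_mem_keys (PySem.Dict.mk cache) x

theorem pv_inv_step (num : Int) (cache : List (Int × Int)) (seen : PySem.Set Int)
    (hinv : ∀ x : Int, (PySem.Dict.mk cache).contains x = PySem.Set.contains seen x)
    (hc : (PySem.Dict.mk cache).contains num = false) :
    ∀ x : Int, (PySem.Dict.mk (((PySem.Dict.mk cache).insert num num).items)).contains x
      = PySem.Set.contains (PySem.Set.add seen num) x := by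
  intro x
  have hitems : ((PySem.Dict.mk cache).insert num num).items = cache ++ [(num, num)] :=
    PySem.Dict.items_insert_of_not_contains _ _ hc
  apply pv_bool_eq
  rw [pv_dict_mem, hitems, PySem.Set.contains_iff, PySem.Set.mem_add,
    List.map_append, List.mem_append, ← pv_dict_mem, hinv x, PySem.Set.contains_iff]
  simp

theorem pv_inv_init (cache : List (Int × Int)) :
    ∀ x : Int, (PySem.Dict.mk cache).contains x
      = PySem.Set.contains (PySem.Set.ofList ((PySem.Dict.mk cache).keys)) x := by
  intro x
  apply pv_bool_eq
  rw [PySem.Set.contains_iff, PySem.Set.mem_ofList,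
    ← PySem.Dict.contains_iff_mem_keys]

-- the fuel bound depends only on which numbers are in the seen-list
theorem pvFreeCount_congr (s t : List Int) (h : ∀ x : Int, x ∈ s ↔ x ∈ t) :
    pvFreeCount s = pvFreeCount t := by
  unfold pvFreeCount
  congr 1
  apply List.filter_congr
  intro a _
  simp [h ((a : Nat) : Int)]

theorem pvMeasureS_congr (num : Int) (s t : List Int) (h : ∀ x : Int, x ∈ s ↔ x ∈ t) :
    pvMeasureS num s = pvMeasureS num t := by
  unfold pvMeasureS
  rw [pvFreeCount_congr s t h]

-- ----- one-step unfoldings of the two loops -----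

theorem pvGoA_succ (fuel : Nat) (num : Int) (cache : List (Int × Int)) :
    pvGoA (fuel + 1) num cache =
      if num = 1 then true
      else if (PySem.Dict.mk cache).contains num then false
      else
        match pvSumSq? (PySem.Int.toChars num) with
        | none => false
        | some squared => pvGoA fuel squared (((PySem.Dict.mk cache).insert num num).items) := rfl

theorem pvGoB_succ (fuel : Nat) (num : Int) (seen : PySem.Set Int) :
    pvGoB (fuel + 1) num seen =
      if num ≠ 1 then
        if PySem.Set.contains seen num then false
        else pvGoB fuel (pvDigitSquares num 0) (PySem.Set.add seen num)
      else true := rfl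

-- ----- the two loops agree on every sufficient fuel -----

theorem pv_agree : ∀ (fuel : Nat) (num : Int) (cache : List (Int × Int)) (seen : PySem.Set Int),
    (∀ x : Int, (PySem.Dict.mk cache).contains x = PySem.Set.contains seen x) →
    Pre_happy_number_helper num cache →
    pvMeasureS num seen < fuel →
    pvGoA fuel num cache = pvGoB fuel num seen := by
  intro fuel
  induction fuel with
  | zero => intro num cache seen _ _ hm; omega
  | succ fuel ih =>
    intro num cache seen hinv hpre hm
    rw [pvGoA_succ, pvGoB_succ]
    by_cases h1 : num = 1
    · rw [if_pos h1, if_neg (by simpa using h1)]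
    · rw [if_neg h1, if_pos h1]
      cases hc : PySem.Set.contains seen num with
      | true => rw [hinv num, hc]; rfl
      | false =>
        have hcd : (PySem.Dict.mk cache).contains num = false := by rw [hinv num, hc]
        rw [hcd]
        have h0 : 0 ≤ num := by
          rcases hpre with h | h
          · exact h
          · rw [hcd] at h; exact absurd h (by simp)
        have hnotmem : num ∉ seen := fun hmem =>
          (Bool.eq_false_iff.mp hc) ((PySem.Set.contains_iff seen num).mpr hmem)
        have hdec := pvMeasureS_dec num seen hnotmem
        rw [pvSumSq_toChars num h0]
        show pvGoA fuel (pvDigitSquares num 0) _ = _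
        exact ih (pvDigitSquares num 0) _ _ (pv_inv_step num cache seen hinv hcd)
          (Or.inl (pvDS_nonneg num))
          (by rw [← PySem.Set.add_of_not_mem hnotmem] at hdec; omega)

-- ===== VERDICT (by name: the statement is the Claim_ definition above) =====
theorem happy_number_helper_spec : Claim_equal_happy_number_helper := by
  intro num cache _ hpre
  show happy_number_helper num cache = happy_number_helper_alt num cache
  unfold happy_number_helper happy_number_helper_alt
  have hkeys : ∀ x : Int, x ∈ cache.map Prod.fst
      ↔ x ∈ PySem.Set.ofList ((PySem.Dict.mk cache).keys) := by
    intro x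
    rw [PySem.Set.mem_ofList, ← pv_dict_mem, PySem.Dict.contains_iff_mem_keys]
  rw [pvMeasureS_congr num _ _ hkeys]
  exact pv_agree _ num cache _ (pv_inv_init cache) hpre (by omega)
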